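-- pv_equiv track=rewrite | github.com/nkpro2000/my-dir | Setup/Tty/setup-nk_kbd.py | get_modifiers
-- ===== SOURCE A (Python) =====
-- MODIFIRES = ['shift', 'altgr', 'control', 'alt', 'shiftl', 'shiftr', 'ctrll', 'ctrlr', 'capsshift']
--
-- def get_modifiers(w:int) -> str:
--     if w==0: return 'plain'
--
--     modifiers = []
--     for i,j in zip(bin(w)[:1:-1], MODIFIRES):
--         if i == '1':
--             modifiers.append(j)
--
--     modifiers_order = [3, 1, 4, 2, -1, -2, -3, -4, -10]
--     modifiers.sort(key= lambda x:modifiers_order[MODIFIRES.index(x)])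
--
--     return ' '.join(modifiers)
-- ===== SOURCE B (Python) =====
-- # Same result without the gather-then-sort: a constant table already in final
-- # output order (ascending priority), one filtered pass over it.
-- ORDER = [(8, 'capsshift'), (7, 'ctrlr'), (6, 'ctrll'), (5, 'shiftr'),
--          (4, 'shiftl'), (1, 'altgr'), (3, 'alt'), (0, 'shift'), (2, 'control')]
--
-- def get_modifiers(w:int) -> str:
--     if w == 0: return 'plain'
--     bits = bin(w)[:1:-1]
--     return ' '.join(name for pos, name in ORDER
--                     if pos < len(bits) and bits[pos] == '1')
-- ===== Notes on version B (the rewrite author's own statement) =====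
-- stated objective: simpler
-- what changed: B replaces A's gather-then-sort (collect matching names from zip(bits, MODIFIRES), then sort by a priority lookup) with a single filtered pass over a constant (bit_position, name) table precomputed in the final output order, eliminating both the collect loop and the sort.
import Mathlib
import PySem

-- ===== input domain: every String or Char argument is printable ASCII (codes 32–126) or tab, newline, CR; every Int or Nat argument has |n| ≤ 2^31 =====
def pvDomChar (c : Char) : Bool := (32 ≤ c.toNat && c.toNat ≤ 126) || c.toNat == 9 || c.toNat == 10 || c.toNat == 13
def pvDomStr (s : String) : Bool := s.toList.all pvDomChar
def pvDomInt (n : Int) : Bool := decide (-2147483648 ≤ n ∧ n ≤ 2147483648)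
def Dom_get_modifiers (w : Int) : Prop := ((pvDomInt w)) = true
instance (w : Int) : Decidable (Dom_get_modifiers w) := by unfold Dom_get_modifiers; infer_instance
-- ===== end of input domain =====

-- B replaces A's gather-then-sort with one filtered pass over a constant table already in output order (objective: simpler).

-- ===== PORT A =====
def MODIFIRES : List String :=
  ["shift", "altgr", "control", "alt", "shiftl", "shiftr", "ctrll", "ctrlr", "capsshift"]

def modifiers_order : List Int := [3, 1, 4, 2, -1, -2, -3, -4, -10]

-- key = lambda x: modifiers_order[MODIFIRES.index(x)].  Python's list.index raises when x is
-- absent, but here x always comes from MODIFIRES, so index? is always `some`; `.getD 0` and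
-- pyGetD's default are never reached (the index is in range 0..8).
def pyKeyA (x : String) : Int :=
  PySem.List.pyGetD modifiers_order (((PySem.List.index? MODIFIRES x).getD 0 : Nat) : Int) 0

def get_modifiers (w : Int) : String :=
  if w == 0 then "plain" else
  -- bin(w)[:1:-1]; step -1 ≠ 0 so slice? is always `some` and `.getD []` is never reached
  let bits : List Char := (PySem.List.slice? (PySem.Int.pyBin w).toList none (some 1) (-1)).getD []
  let modifiers : List String :=
    (bits.zip MODIFIRES).foldl (fun acc ij => if ij.1 == '1' then acc ++ [ij.2] else acc) []
  PySem.Str.join " " (PySem.List.sorted modifiers pyKeyA)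

-- ===== PORT B =====
def ORDER : List (Nat × String) :=
  [(8, "capsshift"), (7, "ctrlr"), (6, "ctrll"), (5, "shiftr"),
   (4, "shiftl"), (1, "altgr"), (3, "alt"), (0, "shift"), (2, "control")]

def get_modifiers_alt (w : Int) : String :=
  if w == 0 then "plain" else
  let bits : List Char := (PySem.List.slice? (PySem.Int.pyBin w).toList none (some 1) (-1)).getD []
  -- bits[pos] guarded by pos < len(bits), so plain getD indexing is exact here
  PySem.Str.join " "
    ((ORDER.filter (fun pn => decide (pn.1 < bits.length) && (bits.getD pn.1 ' ' == '1'))).map (·.2))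

-- ===== PRECONDITION & SPEC =====
def Spec_get_modifiers (w : Int) (out : String) : Prop := out = get_modifiers_alt w
instance (w : Int) (out : String) : Decidable (Spec_get_modifiers w out) := by unfold Spec_get_modifiers; infer_instance

-- ===== CLAIM (what is proved, stated in full; the proofs are below) =====
def Claim_equal_get_modifiers : Prop := ∀ (w : Int), Dom_get_modifiers w → Spec_get_modifiers w (get_modifiers w)

-- ===== LEMMAS AND PROOFS =====

-- A's collect loop over zip(bits, names), as a filter of the index-annotated name table.
lemma collect_eq_filter_zipIdx (names : List String) :
    ∀ (k : Nat) (bits : List Char),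
    (((bits.drop k).zip names).filter (fun p => p.1 == '1')).map (·.2)
    = ((names.zipIdx k).filter
        (fun p => decide (p.2 < bits.length) && (bits.getD p.2 ' ' == '1'))).map (·.1) := by
  induction names with
  | nil => intro k bits; simp
  | cons n ns ih =>
    intro k bits
    by_cases h : k < bits.length
    · rw [List.drop_eq_getElem_cons h]
      simp only [List.zip_cons_cons, List.zipIdx_cons, List.filter_cons, List.getD_eq_getElem?_getD,
        List.getElem?_eq_getElem h, Option.getD_some, decide_eq_true h, Bool.true_and]
      by_cases hc : bits[k] == '1' <;> simp [hc, ih (k + 1) bits]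
    · have hd : bits.drop k = [] := List.drop_eq_nil_of_le (by omega)
      have hd1 : bits.drop (k + 1) = [] := List.drop_eq_nil_of_le (by omega)
      have ht := ih (k + 1) bits
      rw [hd1] at ht
      simp only [List.zip_nil_left, List.filter_nil, List.map_nil] at ht
      simp only [hd, List.zip_nil_left, List.filter_nil, List.map_nil, List.zipIdx_cons,
        List.filter_cons]
      rw [show decide (k < bits.length) = false from decide_eq_false h]
      simp only [Bool.false_and, Bool.false_eq_true, if_false]
      exact ht

-- The two branch bodies agree for EVERY bits list (ORDER is a key-sorted permutation of the
-- indexed MODIFIRES table, so sorting A's gathered names yields exactly B's filtered pass).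
lemma core (bits : List Char) :
    PySem.List.sorted
      ((bits.zip MODIFIRES).foldl (fun acc ij => if ij.1 == '1' then acc ++ [ij.2] else acc) [])
      pyKeyA
    = (ORDER.filter (fun pn => decide (pn.1 < bits.length) && (bits.getD pn.1 ' ' == '1'))).map (·.2) := by
  apply PySem.List.sorted_eq_of_perm_of_pairwise_lt
  · simp only [PySem.List.foldl_append_if (fun (p : Char × String) => p.1 == '1')
      (fun (p : Char × String) => p.2), List.nil_append]
    have h0 := collect_eq_filter_zipIdx MODIFIRES 0 bits
    rw [List.drop_zero] at h0
    rw [h0]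
    have hperm : ORDER.Perm (MODIFIRES.zipIdx.map (fun p => (p.2, p.1))) := by decide
    have hp := (hperm.filter
        (fun pn => decide (pn.1 < bits.length) && (bits.getD pn.1 ' ' == '1'))).map
        (fun pn : Nat × String => pn.2)
    have e : (((MODIFIRES.zipIdx.map (fun p => (p.2, p.1))).filter
          (fun pn => decide (pn.1 < bits.length) && (bits.getD pn.1 ' ' == '1'))).map
          (fun pn : Nat × String => pn.2))
        = ((MODIFIRES.zipIdx.filter
            (fun p => decide (p.2 < bits.length) && (bits.getD p.2 ' ' == '1'))).map (·.1)) := by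
      rw [List.filter_map, List.map_map]; rfl
    exact e ▸ hp
  · apply List.Pairwise.sublist (List.Sublist.map _ List.filter_sublist)
    show (ORDER.map (·.2)).Pairwise (fun a b => pyKeyA a < pyKeyA b)
    decide

-- ===== VERDICT (by name: the statement is the Claim_ definition above) =====
theorem get_modifiers_spec : Claim_equal_get_modifiers := by
  intro w _
  unfold Spec_get_modifiers get_modifiers get_modifiers_alt
  rcases eq_or_ne w 0 with h | h
  · simp [h]
  · simp only [beq_eq_false_iff_ne.mpr h, Bool.false_eq_true, if_false]
    exact congrArg _ (core _)
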